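-- pv_equiv track=rewrite | github.com/judeper/FSI-AgentGov | scripts/tailor_zone_guidance.py | _topic_phrases
-- ===== SOURCE A (Python) =====
-- def _topic_phrases(title: str) -> dict[str, str]:
--     t = title.lower()
--
--     def has(*words: str) -> bool:
--         return all(w in t for w in words)
--
--     # Default phrases
--     action = f"{title} controls"
--     primary = "apply the control"
--     evidence = "retain evidence (screenshots/exports/logs)"
--
--     if "data loss prevention" in t or "dlp" in t:
--         action = "DLP policies and sensitivity labels"
--         primary = "apply DLP to AI locations (Copilot/M365, Copilot Studio) and label-conditioned rules"
--         evidence = "retain policy export + test prompts/results"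
--     elif "conditional access" in t or "mfa" in t:
--         action = "Conditional Access and phishing-resistant MFA"
--         primary = "enforce strong auth and risk-aware access for admin/maker roles"
--         evidence = "retain policy JSON/export + sign-in log samples"
--     elif "retention" in t:
--         action = "retention policies/labels for SharePoint content"
--         primary = "ensure agent knowledge sources follow retention and disposition rules"
--         evidence = "retain policy configs + evidence of label/policy assignment"
--     elif "access review" in t or "certification" in t or "attestation" in t:
--         action = "SharePoint access reviews and certification"
--         primary = "run periodic access reviews/attestations for agent knowledge sites"
--         evidence = "retain review exports/attestation records"
--     elif "environment group" in t or "tier classification" in t: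
--         action = "environment groups and tier classification"
--         primary = "apply zone-aligned rules consistently across environments"
--         evidence = "retain rule snapshots + group membership exports"
--     elif "business continuity" in t or "disaster recovery" in t:
--         action = "business continuity and disaster recovery"
--         primary = "define RTO/RPO for critical agents and validate restore procedures"
--         evidence = "retain test results + recovery runbooks"
--     elif "sensitive information" in t or "sits" in t or "pattern recognition" in t:
--         action = "Sensitive Information Types (SITs)"
--         primary = "maintain SIT definitions and test detection quality"
--         evidence = "retain SIT definitions + test corpus results"
--     elif "audit" in t and "logging" in t:
--         action = "audit logging"
--         primary = "ensure key agent/admin activities are logged and reviewable"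
--         evidence = "retain audit configuration + sample queries"
--     elif "ediscovery" in t:
--         action = "eDiscovery"
--         primary = "ensure agent interactions/content are discoverable and hold-capable"
--         evidence = "retain case settings + sample holds/searches"
--     elif "managed environment" in t:
--         action = "managed environments"
--         primary = "enable managed environment governance controls for shared/production"
--         evidence = "retain environment settings exports"
--     elif "sentinel" in t:
--         action = "SIEM integration (Microsoft Sentinel)"
--         primary = "forward and correlate agent/security events for monitoring"
--         evidence = "retain connector config + sample alerts"
--
--     return {"action": action, "primary": primary, "evidence": evidence}
-- ===== SOURCE B (Python) =====
-- # B: instead of an ordered first-match elif chain, evaluate every keyword once,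
-- # collect the indices of all matching rules, and select the winning rule by
-- # arithmetic min over the hit indices (correct because A's chain returns the
-- # lowest-indexed rule whose condition holds).
--
-- _KEYWORDS = [
--     ("data loss prevention", 0), ("dlp", 0),
--     ("conditional access", 1), ("mfa", 1),
--     ("retention", 2),
--     ("access review", 3), ("certification", 3), ("attestation", 3),
--     ("environment group", 4), ("tier classification", 4),
--     ("business continuity", 5), ("disaster recovery", 5),
--     ("sensitive information", 6), ("sits", 6), ("pattern recognition", 6),
--     ("ediscovery", 8),
--     ("managed environment", 9),
--     ("sentinel", 10),
-- ]
--
-- _OUTPUTS = [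
--     ("DLP policies and sensitivity labels",
--      "apply DLP to AI locations (Copilot/M365, Copilot Studio) and label-conditioned rules",
--      "retain policy export + test prompts/results"),
--     ("Conditional Access and phishing-resistant MFA",
--      "enforce strong auth and risk-aware access for admin/maker roles",
--      "retain policy JSON/export + sign-in log samples"),
--     ("retention policies/labels for SharePoint content",
--      "ensure agent knowledge sources follow retention and disposition rules",
--      "retain policy configs + evidence of label/policy assignment"),
--     ("SharePoint access reviews and certification",
--      "run periodic access reviews/attestations for agent knowledge sites",
--      "retain review exports/attestation records"),
--     ("environment groups and tier classification",
--      "apply zone-aligned rules consistently across environments",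
--      "retain rule snapshots + group membership exports"),
--     ("business continuity and disaster recovery",
--      "define RTO/RPO for critical agents and validate restore procedures",
--      "retain test results + recovery runbooks"),
--     ("Sensitive Information Types (SITs)",
--      "maintain SIT definitions and test detection quality",
--      "retain SIT definitions + test corpus results"),
--     ("audit logging",
--      "ensure key agent/admin activities are logged and reviewable",
--      "retain audit configuration + sample queries"),
--     ("eDiscovery",
--      "ensure agent interactions/content are discoverable and hold-capable",
--      "retain case settings + sample holds/searches"),
--     ("managed environments",
--      "enable managed environment governance controls for shared/production",
--      "retain environment settings exports"),
--     ("SIEM integration (Microsoft Sentinel)",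
--      "forward and correlate agent/security events for monitoring",
--      "retain connector config + sample alerts"),
-- ]
--
--
-- def _topic_phrases(title: str) -> dict[str, str]:
--     t = title.lower()
--     hits = [i for kw, i in _KEYWORDS if kw in t]
--     if "audit" in t and "logging" in t:
--         hits.append(7)
--     if hits:
--         action, primary, evidence = _OUTPUTS[min(hits)]
--     else:
--         action = f"{title} controls"
--         primary = "apply the control"
--         evidence = "retain evidence (screenshots/exports/logs)"
--     return {"action": action, "primary": primary, "evidence": evidence}
-- ===== Notes on version B (the rewrite author's own statement) =====
-- stated objective: alternative
-- what changed: Replaces the ordered short-circuit if/elif chain by a keyword->rule-index table: B evaluates every keyword once, collects the indices of all matching rules (plus index 7 when both 'audit' and 'logging' occur), and selects the winning rule by arithmetic min over the hit indices, then reads the phrase triple from an indexed output table.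
import Mathlib
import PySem

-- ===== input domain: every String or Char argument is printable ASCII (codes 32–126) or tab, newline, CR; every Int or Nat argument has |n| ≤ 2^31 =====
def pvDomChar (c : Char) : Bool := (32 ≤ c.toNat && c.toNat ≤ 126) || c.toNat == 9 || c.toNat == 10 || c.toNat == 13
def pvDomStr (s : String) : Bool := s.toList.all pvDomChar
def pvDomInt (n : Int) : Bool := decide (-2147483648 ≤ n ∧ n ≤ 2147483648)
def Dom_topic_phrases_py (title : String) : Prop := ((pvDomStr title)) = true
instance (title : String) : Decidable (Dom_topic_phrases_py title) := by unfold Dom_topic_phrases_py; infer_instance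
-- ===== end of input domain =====

-- B replaces A's ordered short-circuit if/elif chain by a keyword->rule-index table: it evaluates
-- every keyword once, collects all hit indices, and selects the rule by arithmetic min (idiomatic/alternative, same cost).


-- ===== PORT A =====
-- both ports return {"action": …, "primary": …, "evidence": …}; this shared assembler is that literal dict
def pvDict (p : String × String × String) : List (String × String) :=
  [("action", p.1), ("primary", p.2.1), ("evidence", p.2.2)]

def topic_phrases_py (title : String) : List (String × String) :=
  let t := PySem.Str.lower title
  pvDict <|
    if PySem.Str.isIn "data loss prevention" t || PySem.Str.isIn "dlp" t then
      ("DLP policies and sensitivity labels",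
       "apply DLP to AI locations (Copilot/M365, Copilot Studio) and label-conditioned rules",
       "retain policy export + test prompts/results")
    else if PySem.Str.isIn "conditional access" t || PySem.Str.isIn "mfa" t then
      ("Conditional Access and phishing-resistant MFA",
       "enforce strong auth and risk-aware access for admin/maker roles",
       "retain policy JSON/export + sign-in log samples")
    else if PySem.Str.isIn "retention" t then
      ("retention policies/labels for SharePoint content",
       "ensure agent knowledge sources follow retention and disposition rules",
       "retain policy configs + evidence of label/policy assignment")
    else if PySem.Str.isIn "access review" t || (PySem.Str.isIn "certification" t || PySem.Str.isIn "attestation" t) then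
      ("SharePoint access reviews and certification",
       "run periodic access reviews/attestations for agent knowledge sites",
       "retain review exports/attestation records")
    else if PySem.Str.isIn "environment group" t || PySem.Str.isIn "tier classification" t then
      ("environment groups and tier classification",
       "apply zone-aligned rules consistently across environments",
       "retain rule snapshots + group membership exports")
    else if PySem.Str.isIn "business continuity" t || PySem.Str.isIn "disaster recovery" t then
      ("business continuity and disaster recovery",
       "define RTO/RPO for critical agents and validate restore procedures",
       "retain test results + recovery runbooks")
    else if PySem.Str.isIn "sensitive information" t || (PySem.Str.isIn "sits" t || PySem.Str.isIn "pattern recognition" t) then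
      ("Sensitive Information Types (SITs)",
       "maintain SIT definitions and test detection quality",
       "retain SIT definitions + test corpus results")
    else if PySem.Str.isIn "audit" t && PySem.Str.isIn "logging" t then
      ("audit logging",
       "ensure key agent/admin activities are logged and reviewable",
       "retain audit configuration + sample queries")
    else if PySem.Str.isIn "ediscovery" t then
      ("eDiscovery",
       "ensure agent interactions/content are discoverable and hold-capable",
       "retain case settings + sample holds/searches")
    else if PySem.Str.isIn "managed environment" t then
      ("managed environments",
       "enable managed environment governance controls for shared/production",
       "retain environment settings exports")
    else if PySem.Str.isIn "sentinel" t then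
      ("SIEM integration (Microsoft Sentinel)",
       "forward and correlate agent/security events for monitoring",
       "retain connector config + sample alerts")
    else
      (title ++ " controls", "apply the control", "retain evidence (screenshots/exports/logs)")

-- ===== PORT B =====
-- _KEYWORDS of Source B: keyword -> index of the rule it selects (rule 7, audit logging, is an AND and is handled separately)
def pvKeywords : List (String × Int) :=
  [("data loss prevention", 0), ("dlp", 0),
   ("conditional access", 1), ("mfa", 1),
   ("retention", 2),
   ("access review", 3), ("certification", 3), ("attestation", 3),
   ("environment group", 4), ("tier classification", 4),
   ("business continuity", 5), ("disaster recovery", 5),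
   ("sensitive information", 6), ("sits", 6), ("pattern recognition", 6),
   ("ediscovery", 8),
   ("managed environment", 9),
   ("sentinel", 10)]

-- _OUTPUTS of Source B: the (action, primary, evidence) triple of each rule, indexed 0..10
def pvOutputs : List (String × String × String) :=
  [("DLP policies and sensitivity labels",
    "apply DLP to AI locations (Copilot/M365, Copilot Studio) and label-conditioned rules",
    "retain policy export + test prompts/results"),
   ("Conditional Access and phishing-resistant MFA",
    "enforce strong auth and risk-aware access for admin/maker roles",
    "retain policy JSON/export + sign-in log samples"),
   ("retention policies/labels for SharePoint content",
    "ensure agent knowledge sources follow retention and disposition rules",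
    "retain policy configs + evidence of label/policy assignment"),
   ("SharePoint access reviews and certification",
    "run periodic access reviews/attestations for agent knowledge sites",
    "retain review exports/attestation records"),
   ("environment groups and tier classification",
    "apply zone-aligned rules consistently across environments",
    "retain rule snapshots + group membership exports"),
   ("business continuity and disaster recovery",
    "define RTO/RPO for critical agents and validate restore procedures",
    "retain test results + recovery runbooks"),
   ("Sensitive Information Types (SITs)",
    "maintain SIT definitions and test detection quality",
    "retain SIT definitions + test corpus results"),
   ("audit logging",
    "ensure key agent/admin activities are logged and reviewable",
    "retain audit configuration + sample queries"),
   ("eDiscovery",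
    "ensure agent interactions/content are discoverable and hold-capable",
    "retain case settings + sample holds/searches"),
   ("managed environments",
    "enable managed environment governance controls for shared/production",
    "retain environment settings exports"),
   ("SIEM integration (Microsoft Sentinel)",
    "forward and correlate agent/security events for monitoring",
    "retain connector config + sample alerts")]

-- Source B: hits = [i for kw, i in _KEYWORDS if kw in t]; if "audit" in t and "logging" in t: hits.append(7);
-- if hits: _OUTPUTS[min(hits)] else defaults.  The matched index is always 0..10, so _OUTPUTS[min(hits)]
-- never raises; .getD merely totalizes pyGet? (the default is never used).
def topic_phrases_py_alt (title : String) : List (String × String) :=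
  let t := PySem.Str.lower title
  let hits := pvKeywords.filterMap (fun p => if PySem.Str.isIn p.1 t then some p.2 else none)
  let hits := if PySem.Str.isIn "audit" t && PySem.Str.isIn "logging" t then hits ++ [(7 : Int)] else hits
  match PySem.List.min? hits (fun x => x) with
  | some i => pvDict ((PySem.List.pyGet? pvOutputs i).getD ("", "", ""))
  | none => pvDict (title ++ " controls", "apply the control", "retain evidence (screenshots/exports/logs)")

-- ===== PRECONDITION & SPEC =====
def Spec_topic_phrases_py (title : String) (out : List (String × String)) : Prop := out = topic_phrases_py_alt title
instance (title : String) (out : List (String × String)) : Decidable (Spec_topic_phrases_py title out) := by unfold Spec_topic_phrases_py; infer_instance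

-- ===== CLAIM (what is proved, stated in full; the proofs are below) =====
def Claim_equal_topic_phrases_py : Prop := ∀ (title : String), Dom_topic_phrases_py title → Spec_topic_phrases_py title (topic_phrases_py title)

-- ===== LEMMAS AND PROOFS =====

-- the final hit list of Source B, as a function of the lowered title (definitionally equal to the port's)
def pvHits2 (t : String) : List Int :=
  let hits := pvKeywords.filterMap (fun p => if PySem.Str.isIn p.1 t then some p.2 else none)
  if PySem.Str.isIn "audit" t && PySem.Str.isIn "logging" t then hits ++ [(7 : Int)] else hits

lemma fm_cons (t : String) (a : String × Int) (l : List (String × Int)) :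
    List.filterMap (fun p => if PySem.Str.isIn p.1 t then some p.2 else none) (a :: l)
      = (if PySem.Str.isIn a.1 t then [a.2] else [])
        ++ List.filterMap (fun p => if PySem.Str.isIn p.1 t then some p.2 else none) l := by
  cases hg : PySem.Chars.isIn a.1.toList t.toList <;> simp [hg]

lemma mem_ite_singleton (c : Prop) [Decidable c] (k x : Int) :
    x ∈ (if c then [k] else ([] : List Int)) ↔ c ∧ x = k := by
  split_ifs with h <;> simp [h]

lemma mem_pvHits (t : String) (x : Int) :
    x ∈ pvKeywords.filterMap (fun p => if PySem.Str.isIn p.1 t then some p.2 else none) ↔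
      (PySem.Str.isIn "data loss prevention" t = true ∧ x = 0) ∨
      (PySem.Str.isIn "dlp" t = true ∧ x = 0) ∨
      (PySem.Str.isIn "conditional access" t = true ∧ x = 1) ∨
      (PySem.Str.isIn "mfa" t = true ∧ x = 1) ∨
      (PySem.Str.isIn "retention" t = true ∧ x = 2) ∨
      (PySem.Str.isIn "access review" t = true ∧ x = 3) ∨
      (PySem.Str.isIn "certification" t = true ∧ x = 3) ∨
      (PySem.Str.isIn "attestation" t = true ∧ x = 3) ∨
      (PySem.Str.isIn "environment group" t = true ∧ x = 4) ∨
      (PySem.Str.isIn "tier classification" t = true ∧ x = 4) ∨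
      (PySem.Str.isIn "business continuity" t = true ∧ x = 5) ∨
      (PySem.Str.isIn "disaster recovery" t = true ∧ x = 5) ∨
      (PySem.Str.isIn "sensitive information" t = true ∧ x = 6) ∨
      (PySem.Str.isIn "sits" t = true ∧ x = 6) ∨
      (PySem.Str.isIn "pattern recognition" t = true ∧ x = 6) ∨
      (PySem.Str.isIn "ediscovery" t = true ∧ x = 8) ∨
      (PySem.Str.isIn "managed environment" t = true ∧ x = 9) ∨
      (PySem.Str.isIn "sentinel" t = true ∧ x = 10) := by
  unfold pvKeywords
  simp only [fm_cons, List.filterMap_nil, List.append_nil, List.mem_append,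
    mem_ite_singleton]

lemma mem_pvHits2 (t : String) (x : Int) :
    x ∈ pvHits2 t ↔
      (x ∈ pvKeywords.filterMap (fun p => if PySem.Str.isIn p.1 t then some p.2 else none)) ∨
      ((PySem.Str.isIn "audit" t = true ∧ PySem.Str.isIn "logging" t = true) ∧ x = 7) := by
  unfold pvHits2
  split_ifs with h
  · rw [Bool.and_eq_true] at h
    rw [List.mem_append, List.mem_singleton]
    constructor
    · rintro (hx | rfl)
      · exact Or.inl hx
      · exact Or.inr ⟨h, rfl⟩
    · rintro (hx | ⟨_, rfl⟩)
      · exact Or.inl hx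
      · exact Or.inr rfl
  · rw [Bool.and_eq_true] at h
    constructor
    · exact Or.inl
    · rintro (hx | ⟨hP, rfl⟩)
      · exact hx
      · exact absurd hP h

lemma min?_id_eq_some_of (l : List Int) (a : Int) (h1 : a ∈ l) (h2 : ∀ x ∈ l, a ≤ x) :
    PySem.List.min? l (fun x => x) = some a := by
  cases hm : PySem.List.min? l (fun x => x) with
  | none =>
      rw [PySem.List.min?_eq_none_iff] at hm
      subst hm; cases h1
  | some m =>
      have h3 : m ≤ a := PySem.List.min?_isMin hm a h1
      have h4 : a ≤ m := h2 m (PySem.List.min?_mem hm)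
      rw [le_antisymm h3 h4]

lemma alt_eq_of_min (title : String) (k : Int)
    (hmin : PySem.List.min? (pvHits2 (PySem.Str.lower title)) (fun x => x) = some k) :
    topic_phrases_py_alt title = pvDict ((PySem.List.pyGet? pvOutputs k).getD ("", "", "")) := by
  unfold topic_phrases_py_alt
  show (match PySem.List.min? (pvHits2 (PySem.Str.lower title)) (fun x => x) with
        | some i => pvDict ((PySem.List.pyGet? pvOutputs i).getD ("", "", ""))
        | none => pvDict (title ++ " controls", "apply the control", "retain evidence (screenshots/exports/logs)")) = _
  rw [hmin]

lemma alt_eq_of_none (title : String)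
    (hmin : PySem.List.min? (pvHits2 (PySem.Str.lower title)) (fun x => x) = none) :
    topic_phrases_py_alt title
      = pvDict (title ++ " controls", "apply the control", "retain evidence (screenshots/exports/logs)") := by
  unfold topic_phrases_py_alt
  show (match PySem.List.min? (pvHits2 (PySem.Str.lower title)) (fun x => x) with
        | some i => pvDict ((PySem.List.pyGet? pvOutputs i).getD ("", "", ""))
        | none => pvDict (title ++ " controls", "apply the control", "retain evidence (screenshots/exports/logs)")) = _
  rw [hmin]

-- ===== VERDICT (by name: the statement is the Claim_ definition above) =====
set_option maxHeartbeats 4000000 in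
theorem topic_phrases_py_spec : Claim_equal_topic_phrases_py := by
  intro title _
  unfold Spec_topic_phrases_py
  simp only [topic_phrases_py]
  split_ifs with h0 h1 h2 h3 h4 h5 h6 h7 h8 h9 h10
  · have hmin : PySem.List.min? (pvHits2 (PySem.Str.lower title)) (fun x => x) = some (0 : Int) := by
      apply min?_id_eq_some_of
      · rw [mem_pvHits2, mem_pvHits]
        left
        simp only [Bool.or_eq_true] at h0
        rcases h0 with h|h
        · exact (Or.inl ⟨h, rfl⟩)
        · exact (Or.inr (Or.inl ⟨h, rfl⟩))
      · intro x hx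
        rw [mem_pvHits2, mem_pvHits] at hx
        rcases hx with (⟨h,rfl⟩|⟨h,rfl⟩|⟨h,rfl⟩|⟨h,rfl⟩|⟨h,rfl⟩|⟨h,rfl⟩|⟨h,rfl⟩|⟨h,rfl⟩|⟨h,rfl⟩|⟨h,rfl⟩|⟨h,rfl⟩|⟨h,rfl⟩|⟨h,rfl⟩|⟨h,rfl⟩|⟨h,rfl⟩|⟨h,rfl⟩|⟨h,rfl⟩|⟨h,rfl⟩)|⟨⟨ha,hl⟩,rfl⟩
        all_goals omega
    rw [alt_eq_of_min title _ hmin]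
    rfl
  · have hmin : PySem.List.min? (pvHits2 (PySem.Str.lower title)) (fun x => x) = some (1 : Int) := by
      apply min?_id_eq_some_of
      · rw [mem_pvHits2, mem_pvHits]
        left
        simp only [Bool.or_eq_true] at h1
        rcases h1 with h|h
        · exact (Or.inr (Or.inr (Or.inl ⟨h, rfl⟩)))
        · exact (Or.inr (Or.inr (Or.inr (Or.inl ⟨h, rfl⟩))))
      · intro x hx
        rw [mem_pvHits2, mem_pvHits] at hx
        rcases hx with (⟨h,rfl⟩|⟨h,rfl⟩|⟨h,rfl⟩|⟨h,rfl⟩|⟨h,rfl⟩|⟨h,rfl⟩|⟨h,rfl⟩|⟨h,rfl⟩|⟨h,rfl⟩|⟨h,rfl⟩|⟨h,rfl⟩|⟨h,rfl⟩|⟨h,rfl⟩|⟨h,rfl⟩|⟨h,rfl⟩|⟨h,rfl⟩|⟨h,rfl⟩|⟨h,rfl⟩)|⟨⟨ha,hl⟩,rfl⟩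
        all_goals first | omega | simp_all
    rw [alt_eq_of_min title _ hmin]
    rfl
  · have hmin : PySem.List.min? (pvHits2 (PySem.Str.lower title)) (fun x => x) = some (2 : Int) := by
      apply min?_id_eq_some_of
      · rw [mem_pvHits2, mem_pvHits]
        left
        have h := h2
        exact (Or.inr (Or.inr (Or.inr (Or.inr (Or.inl ⟨h, rfl⟩)))))
      · intro x hx
        rw [mem_pvHits2, mem_pvHits] at hx
        rcases hx with (⟨h,rfl⟩|⟨h,rfl⟩|⟨h,rfl⟩|⟨h,rfl⟩|⟨h,rfl⟩|⟨h,rfl⟩|⟨h,rfl⟩|⟨h,rfl⟩|⟨h,rfl⟩|⟨h,rfl⟩|⟨h,rfl⟩|⟨h,rfl⟩|⟨h,rfl⟩|⟨h,rfl⟩|⟨h,rfl⟩|⟨h,rfl⟩|⟨h,rfl⟩|⟨h,rfl⟩)|⟨⟨ha,hl⟩,rfl⟩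
        all_goals first | omega | simp_all
    rw [alt_eq_of_min title _ hmin]
    rfl
  · have hmin : PySem.List.min? (pvHits2 (PySem.Str.lower title)) (fun x => x) = some (3 : Int) := by
      apply min?_id_eq_some_of
      · rw [mem_pvHits2, mem_pvHits]
        left
        simp only [Bool.or_eq_true] at h3
        rcases h3 with h|h|h
        · exact (Or.inr (Or.inr (Or.inr (Or.inr (Or.inr (Or.inl ⟨h, rfl⟩))))))
        · exact (Or.inr (Or.inr (Or.inr (Or.inr (Or.inr (Or.inr (Or.inl ⟨h, rfl⟩)))))))
        · exact (Or.inr (Or.inr (Or.inr (Or.inr (Or.inr (Or.inr (Or.inr (Or.inl ⟨h, rfl⟩))))))))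
      · intro x hx
        rw [mem_pvHits2, mem_pvHits] at hx
        rcases hx with (⟨h,rfl⟩|⟨h,rfl⟩|⟨h,rfl⟩|⟨h,rfl⟩|⟨h,rfl⟩|⟨h,rfl⟩|⟨h,rfl⟩|⟨h,rfl⟩|⟨h,rfl⟩|⟨h,rfl⟩|⟨h,rfl⟩|⟨h,rfl⟩|⟨h,rfl⟩|⟨h,rfl⟩|⟨h,rfl⟩|⟨h,rfl⟩|⟨h,rfl⟩|⟨h,rfl⟩)|⟨⟨ha,hl⟩,rfl⟩
        all_goals first | omega | simp_all
    rw [alt_eq_of_min title _ hmin]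
    rfl
  · have hmin : PySem.List.min? (pvHits2 (PySem.Str.lower title)) (fun x => x) = some (4 : Int) := by
      apply min?_id_eq_some_of
      · rw [mem_pvHits2, mem_pvHits]
        left
        simp only [Bool.or_eq_true] at h4
        rcases h4 with h|h
        · exact (Or.inr (Or.inr (Or.inr (Or.inr (Or.inr (Or.inr (Or.inr (Or.inr (Or.inl ⟨h, rfl⟩)))))))))
        · exact (Or.inr (Or.inr (Or.inr (Or.inr (Or.inr (Or.inr (Or.inr (Or.inr (Or.inr (Or.inl ⟨h, rfl⟩))))))))))
      · intro x hx
        rw [mem_pvHits2, mem_pvHits] at hx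
        rcases hx with (⟨h,rfl⟩|⟨h,rfl⟩|⟨h,rfl⟩|⟨h,rfl⟩|⟨h,rfl⟩|⟨h,rfl⟩|⟨h,rfl⟩|⟨h,rfl⟩|⟨h,rfl⟩|⟨h,rfl⟩|⟨h,rfl⟩|⟨h,rfl⟩|⟨h,rfl⟩|⟨h,rfl⟩|⟨h,rfl⟩|⟨h,rfl⟩|⟨h,rfl⟩|⟨h,rfl⟩)|⟨⟨ha,hl⟩,rfl⟩
        all_goals first | omega | simp_all
    rw [alt_eq_of_min title _ hmin]
    rfl
  · have hmin : PySem.List.min? (pvHits2 (PySem.Str.lower title)) (fun x => x) = some (5 : Int) := by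
      apply min?_id_eq_some_of
      · rw [mem_pvHits2, mem_pvHits]
        left
        simp only [Bool.or_eq_true] at h5
        rcases h5 with h|h
        · exact (Or.inr (Or.inr (Or.inr (Or.inr (Or.inr (Or.inr (Or.inr (Or.inr (Or.inr (Or.inr (Or.inl ⟨h, rfl⟩)))))))))))
        · exact (Or.inr (Or.inr (Or.inr (Or.inr (Or.inr (Or.inr (Or.inr (Or.inr (Or.inr (Or.inr (Or.inr (Or.inl ⟨h, rfl⟩))))))))))))
      · intro x hx
        rw [mem_pvHits2, mem_pvHits] at hx
        rcases hx with (⟨h,rfl⟩|⟨h,rfl⟩|⟨h,rfl⟩|⟨h,rfl⟩|⟨h,rfl⟩|⟨h,rfl⟩|⟨h,rfl⟩|⟨h,rfl⟩|⟨h,rfl⟩|⟨h,rfl⟩|⟨h,rfl⟩|⟨h,rfl⟩|⟨h,rfl⟩|⟨h,rfl⟩|⟨h,rfl⟩|⟨h,rfl⟩|⟨h,rfl⟩|⟨h,rfl⟩)|⟨⟨ha,hl⟩,rfl⟩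
        all_goals first | omega | simp_all
    rw [alt_eq_of_min title _ hmin]
    rfl
  · have hmin : PySem.List.min? (pvHits2 (PySem.Str.lower title)) (fun x => x) = some (6 : Int) := by
      apply min?_id_eq_some_of
      · rw [mem_pvHits2, mem_pvHits]
        left
        simp only [Bool.or_eq_true] at h6
        rcases h6 with h|h|h
        · exact (Or.inr (Or.inr (Or.inr (Or.inr (Or.inr (Or.inr (Or.inr (Or.inr (Or.inr (Or.inr (Or.inr (Or.inr (Or.inl ⟨h, rfl⟩)))))))))))))
        · exact (Or.inr (Or.inr (Or.inr (Or.inr (Or.inr (Or.inr (Or.inr (Or.inr (Or.inr (Or.inr (Or.inr (Or.inr (Or.inr (Or.inl ⟨h, rfl⟩))))))))))))))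
        · exact (Or.inr (Or.inr (Or.inr (Or.inr (Or.inr (Or.inr (Or.inr (Or.inr (Or.inr (Or.inr (Or.inr (Or.inr (Or.inr (Or.inr (Or.inl ⟨h, rfl⟩)))))))))))))))
      · intro x hx
        rw [mem_pvHits2, mem_pvHits] at hx
        rcases hx with (⟨h,rfl⟩|⟨h,rfl⟩|⟨h,rfl⟩|⟨h,rfl⟩|⟨h,rfl⟩|⟨h,rfl⟩|⟨h,rfl⟩|⟨h,rfl⟩|⟨h,rfl⟩|⟨h,rfl⟩|⟨h,rfl⟩|⟨h,rfl⟩|⟨h,rfl⟩|⟨h,rfl⟩|⟨h,rfl⟩|⟨h,rfl⟩|⟨h,rfl⟩|⟨h,rfl⟩)|⟨⟨ha,hl⟩,rfl⟩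
        all_goals first | omega | simp_all
    rw [alt_eq_of_min title _ hmin]
    rfl
  · have hmin : PySem.List.min? (pvHits2 (PySem.Str.lower title)) (fun x => x) = some (7 : Int) := by
      apply min?_id_eq_some_of
      · rw [mem_pvHits2, mem_pvHits]
        right
        rw [Bool.and_eq_true] at h7
        exact ⟨h7, rfl⟩
      · intro x hx
        rw [mem_pvHits2, mem_pvHits] at hx
        rcases hx with (⟨h,rfl⟩|⟨h,rfl⟩|⟨h,rfl⟩|⟨h,rfl⟩|⟨h,rfl⟩|⟨h,rfl⟩|⟨h,rfl⟩|⟨h,rfl⟩|⟨h,rfl⟩|⟨h,rfl⟩|⟨h,rfl⟩|⟨h,rfl⟩|⟨h,rfl⟩|⟨h,rfl⟩|⟨h,rfl⟩|⟨h,rfl⟩|⟨h,rfl⟩|⟨h,rfl⟩)|⟨⟨ha,hl⟩,rfl⟩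
        all_goals first | omega | simp_all
    rw [alt_eq_of_min title _ hmin]
    rfl
  · have hmin : PySem.List.min? (pvHits2 (PySem.Str.lower title)) (fun x => x) = some (8 : Int) := by
      apply min?_id_eq_some_of
      · rw [mem_pvHits2, mem_pvHits]
        left
        have h := h8
        exact (Or.inr (Or.inr (Or.inr (Or.inr (Or.inr (Or.inr (Or.inr (Or.inr (Or.inr (Or.inr (Or.inr (Or.inr (Or.inr (Or.inr (Or.inr (Or.inl ⟨h, rfl⟩))))))))))))))))
      · intro x hx
        rw [mem_pvHits2, mem_pvHits] at hx
        rcases hx with (⟨h,rfl⟩|⟨h,rfl⟩|⟨h,rfl⟩|⟨h,rfl⟩|⟨h,rfl⟩|⟨h,rfl⟩|⟨h,rfl⟩|⟨h,rfl⟩|⟨h,rfl⟩|⟨h,rfl⟩|⟨h,rfl⟩|⟨h,rfl⟩|⟨h,rfl⟩|⟨h,rfl⟩|⟨h,rfl⟩|⟨h,rfl⟩|⟨h,rfl⟩|⟨h,rfl⟩)|⟨⟨ha,hl⟩,rfl⟩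
        all_goals first | omega | simp_all
    rw [alt_eq_of_min title _ hmin]
    rfl
  · have hmin : PySem.List.min? (pvHits2 (PySem.Str.lower title)) (fun x => x) = some (9 : Int) := by
      apply min?_id_eq_some_of
      · rw [mem_pvHits2, mem_pvHits]
        left
        have h := h9
        exact (Or.inr (Or.inr (Or.inr (Or.inr (Or.inr (Or.inr (Or.inr (Or.inr (Or.inr (Or.inr (Or.inr (Or.inr (Or.inr (Or.inr (Or.inr (Or.inr (Or.inl ⟨h, rfl⟩)))))))))))))))))
      · intro x hx
        rw [mem_pvHits2, mem_pvHits] at hx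
        rcases hx with (⟨h,rfl⟩|⟨h,rfl⟩|⟨h,rfl⟩|⟨h,rfl⟩|⟨h,rfl⟩|⟨h,rfl⟩|⟨h,rfl⟩|⟨h,rfl⟩|⟨h,rfl⟩|⟨h,rfl⟩|⟨h,rfl⟩|⟨h,rfl⟩|⟨h,rfl⟩|⟨h,rfl⟩|⟨h,rfl⟩|⟨h,rfl⟩|⟨h,rfl⟩|⟨h,rfl⟩)|⟨⟨ha,hl⟩,rfl⟩
        all_goals first | omega | simp_all
    rw [alt_eq_of_min title _ hmin]
    rfl
  · have hmin : PySem.List.min? (pvHits2 (PySem.Str.lower title)) (fun x => x) = some (10 : Int) := by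
      apply min?_id_eq_some_of
      · rw [mem_pvHits2, mem_pvHits]
        left
        have h := h10
        exact (Or.inr (Or.inr (Or.inr (Or.inr (Or.inr (Or.inr (Or.inr (Or.inr (Or.inr (Or.inr (Or.inr (Or.inr (Or.inr (Or.inr (Or.inr (Or.inr (Or.inr ⟨h, rfl⟩)))))))))))))))))
      · intro x hx
        rw [mem_pvHits2, mem_pvHits] at hx
        rcases hx with (⟨h,rfl⟩|⟨h,rfl⟩|⟨h,rfl⟩|⟨h,rfl⟩|⟨h,rfl⟩|⟨h,rfl⟩|⟨h,rfl⟩|⟨h,rfl⟩|⟨h,rfl⟩|⟨h,rfl⟩|⟨h,rfl⟩|⟨h,rfl⟩|⟨h,rfl⟩|⟨h,rfl⟩|⟨h,rfl⟩|⟨h,rfl⟩|⟨h,rfl⟩|⟨h,rfl⟩)|⟨⟨ha,hl⟩,rfl⟩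
        all_goals first | omega | simp_all
    rw [alt_eq_of_min title _ hmin]
    rfl
  · have hmin : PySem.List.min? (pvHits2 (PySem.Str.lower title)) (fun x => x) = none := by
      rw [PySem.List.min?_eq_none_iff]
      rw [List.eq_nil_iff_forall_not_mem]
      intro x hx
      rw [mem_pvHits2, mem_pvHits] at hx
      rcases hx with (⟨h,rfl⟩|⟨h,rfl⟩|⟨h,rfl⟩|⟨h,rfl⟩|⟨h,rfl⟩|⟨h,rfl⟩|⟨h,rfl⟩|⟨h,rfl⟩|⟨h,rfl⟩|⟨h,rfl⟩|⟨h,rfl⟩|⟨h,rfl⟩|⟨h,rfl⟩|⟨h,rfl⟩|⟨h,rfl⟩|⟨h,rfl⟩|⟨h,rfl⟩|⟨h,rfl⟩)|⟨⟨ha,hl⟩,rfl⟩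
      all_goals simp_all
    rw [alt_eq_of_none title hmin]
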